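-- pv_equiv track=rewrite | github.com/urban-malaria/ChatMRPT | _archive/app/runtime/tpr/utils.py | get_geopolitical_zone
-- ===== SOURCE A (Python) =====
-- def get_geopolitical_zone(state: str) -> str:
--     """
--     Get the geopolitical zone for a Nigerian state.
--
--     Args:
--         state: State name
--
--     Returns:
--         Geopolitical zone name
--     """
--     zones = {
--         'North-East': ['Adamawa', 'Bauchi', 'Borno', 'Gombe', 'Taraba', 'Yobe'],
--         'North-West': ['Jigawa', 'Kaduna', 'Kano', 'Katsina', 'Kebbi', 'Sokoto', 'Zamfara'],
--         'North-Central': ['Benue', 'Kogi', 'Kwara', 'Nasarawa', 'Niger', 'Plateau', 'FCT'],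
--         'South-East': ['Abia', 'Anambra', 'Ebonyi', 'Enugu', 'Imo'],
--         'South-South': ['Akwa Ibom', 'Bayelsa', 'Cross River', 'Delta', 'Edo', 'Rivers'],
--         'South-West': ['Ekiti', 'Lagos', 'Ogun', 'Ondo', 'Osun', 'Oyo']
--     }
--
--     for zone, states in zones.items():
--         if state in states:
--             return zone
--
--     return 'Unknown'
-- ===== SOURCE B (Python) =====
-- # Idiomatic module-level lookup table: state -> zone, one O(1) dict .get, no scanning loop.
-- STATE_TO_ZONE = {
--     'Adamawa': 'North-East', 'Bauchi': 'North-East', 'Borno': 'North-East',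
--     'Gombe': 'North-East', 'Taraba': 'North-East', 'Yobe': 'North-East',
--     'Jigawa': 'North-West', 'Kaduna': 'North-West', 'Kano': 'North-West',
--     'Katsina': 'North-West', 'Kebbi': 'North-West', 'Sokoto': 'North-West',
--     'Zamfara': 'North-West',
--     'Benue': 'North-Central', 'Kogi': 'North-Central', 'Kwara': 'North-Central',
--     'Nasarawa': 'North-Central', 'Niger': 'North-Central', 'Plateau': 'North-Central',
--     'FCT': 'North-Central',
--     'Abia': 'South-East', 'Anambra': 'South-East', 'Ebonyi': 'South-East',
--     'Enugu': 'South-East', 'Imo': 'South-East',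
--     'Akwa Ibom': 'South-South', 'Bayelsa': 'South-South', 'Cross River': 'South-South',
--     'Delta': 'South-South', 'Edo': 'South-South', 'Rivers': 'South-South',
--     'Ekiti': 'South-West', 'Lagos': 'South-West', 'Ogun': 'South-West',
--     'Ondo': 'South-West', 'Osun': 'South-West', 'Oyo': 'South-West',
-- }
--
--
-- def get_geopolitical_zone(state: str) -> str:
--     """Get the geopolitical zone for a Nigerian state (flat lookup table)."""
--     return STATE_TO_ZONE.get(state, 'Unknown')
-- ===== Notes on version B (the rewrite author's own statement) =====
-- stated objective: idiomatic
-- what changed: Replaces the per-call loop scanning each zone's state list with a flat module-level state-to-zone lookup table consulted by a single dict .get with an 'Unknown' default; no loop remains.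
import Mathlib
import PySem

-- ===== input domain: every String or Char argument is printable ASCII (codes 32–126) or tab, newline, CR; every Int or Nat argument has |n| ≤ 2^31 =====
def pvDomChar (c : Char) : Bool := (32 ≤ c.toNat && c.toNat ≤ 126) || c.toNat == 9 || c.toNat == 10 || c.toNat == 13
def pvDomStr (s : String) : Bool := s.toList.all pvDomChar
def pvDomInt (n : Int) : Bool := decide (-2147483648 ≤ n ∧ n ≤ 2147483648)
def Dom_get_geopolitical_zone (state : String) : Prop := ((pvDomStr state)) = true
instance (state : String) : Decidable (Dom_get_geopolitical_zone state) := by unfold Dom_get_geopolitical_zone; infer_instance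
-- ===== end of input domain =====

-- B replaces A's per-call scan over each zone's state list with a flat state->zone
-- lookup table consulted by one dict lookup with an 'Unknown' default (idiomatic).

-- ===== PORT A =====
-- the zones dict literal of A (PySem.Dict: association list in insertion order, keys distinct)
def pvZonesA : PySem.Dict String (List String) :=
  ⟨[("North-East", ["Adamawa", "Bauchi", "Borno", "Gombe", "Taraba", "Yobe"]),
   ("North-West", ["Jigawa", "Kaduna", "Kano", "Katsina", "Kebbi", "Sokoto", "Zamfara"]),
   ("North-Central", ["Benue", "Kogi", "Kwara", "Nasarawa", "Niger", "Plateau", "FCT"]),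
   ("South-East", ["Abia", "Anambra", "Ebonyi", "Enugu", "Imo"]),
   ("South-South", ["Akwa Ibom", "Bayelsa", "Cross River", "Delta", "Edo", "Rivers"]),
   ("South-West", ["Ekiti", "Lagos", "Ogun", "Ondo", "Osun", "Oyo"])]⟩

-- 'for zone, states in zones.items(): if state in states: return zone' / 'return "Unknown"'
def pvScanA (state : String) : List (String × List String) → String
  | [] => "Unknown"
  | (zone, states) :: rest =>
      if states.contains state then zone else pvScanA state rest

def get_geopolitical_zone (state : String) : String :=
  pvScanA state pvZonesA.items

-- ===== PORT B =====
-- 'STATE_TO_ZONE = {…}': B's flat module-level table, a dict literal state -> zone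
def pvStateToZone : PySem.Dict String String :=
  ⟨[("Adamawa", "North-East"), ("Bauchi", "North-East"), ("Borno", "North-East"),
   ("Gombe", "North-East"), ("Taraba", "North-East"), ("Yobe", "North-East"),
   ("Jigawa", "North-West"), ("Kaduna", "North-West"), ("Kano", "North-West"),
   ("Katsina", "North-West"), ("Kebbi", "North-West"), ("Sokoto", "North-West"),
   ("Zamfara", "North-West"),
   ("Benue", "North-Central"), ("Kogi", "North-Central"), ("Kwara", "North-Central"),
   ("Nasarawa", "North-Central"), ("Niger", "North-Central"), ("Plateau", "North-Central"),
   ("FCT", "North-Central"),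
   ("Abia", "South-East"), ("Anambra", "South-East"), ("Ebonyi", "South-East"),
   ("Enugu", "South-East"), ("Imo", "South-East"),
   ("Akwa Ibom", "South-South"), ("Bayelsa", "South-South"), ("Cross River", "South-South"),
   ("Delta", "South-South"), ("Edo", "South-South"), ("Rivers", "South-South"),
   ("Ekiti", "South-West"), ("Lagos", "South-West"), ("Ogun", "South-West"),
   ("Ondo", "South-West"), ("Osun", "South-West"), ("Oyo", "South-West")]⟩

-- 'return STATE_TO_ZONE.get(state, "Unknown")'
def get_geopolitical_zone_alt (state : String) : String :=
  pvStateToZone.getD state "Unknown"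

-- ===== PRECONDITION & SPEC =====
def Spec_get_geopolitical_zone (state : String) (out : String) : Prop := out = get_geopolitical_zone_alt state
instance (state : String) (out : String) : Decidable (Spec_get_geopolitical_zone state out) := by unfold Spec_get_geopolitical_zone; infer_instance

-- ===== CLAIM (what is proved, stated in full; the proofs are below) =====
def Claim_equal_get_geopolitical_zone : Prop := ∀ (state : String), Dom_get_geopolitical_zone state → Spec_get_geopolitical_zone state (get_geopolitical_zone state)

-- ===== LEMMAS AND PROOFS =====

-- A's scan returns the first zone whose list contains `state`; that is exactly the
-- first match of `state` in the flattened (state, zone) list.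
theorem pvScanA_eq_find (state : String) (l : List (String × List String)) :
    pvScanA state l =
      ((l.flatMap (fun p => p.2.map (fun s => (s, p.1)))).find?
        (fun q => q.1 == state)).elim "Unknown" (·.2) := by
  induction l with
  | nil => rfl
  | cons hd tl ih =>
    obtain ⟨zone, states⟩ := hd
    rw [pvScanA]
    rw [List.flatMap_cons, List.find?_append, List.find?_map]
    by_cases h : states.contains state = true
    · rw [if_pos h]
      have hmem : state ∈ states := by simpa using h
      have hsome : (states.find? (fun s => s == state)).isSome := by
        rw [List.find?_isSome]; exact ⟨state, hmem, by simp⟩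
      obtain ⟨s0, hs0⟩ := Option.isSome_iff_exists.mp hsome
      simp [Function.comp_def, hs0]
    · rw [if_neg h, ih]
      have hmem : state ∉ states := by simpa using h
      have hn : states.find? (fun s => s == state) = none := by
        rw [List.find?_eq_none]
        intro x hx
        simp only [beq_iff_eq]
        rintro rfl
        exact hmem hx
      simp [Function.comp_def, hn]

-- lookup in a literal dict is the first match of the key in its items list
theorem pv_get?_mk_eq_find {ν : Type} (l : List (String × ν)) (x : String) :
    (PySem.Dict.mk l).get? x = (l.find? (fun p => p.1 == x)).map (·.2) := by
  induction l with
  | nil => rfl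
  | cons hd tl ih =>
    obtain ⟨k, v⟩ := hd
    rw [PySem.Dict.get?_mk_cons, List.find?_cons]
    by_cases h : (k == x) = true
    · simp [h]
    · simp [h, ih]

-- flattening A's zones table gives exactly B's flat table (same 37 pairs, same order)
theorem pv_flatten_eq :
    pvZonesA.items.flatMap (fun p => p.2.map (fun s => (s, p.1))) = pvStateToZone.items := by
  decide

theorem pv_agree (state : String) :
    get_geopolitical_zone state = get_geopolitical_zone_alt state := by
  rw [get_geopolitical_zone, pvScanA_eq_find, pv_flatten_eq]
  rw [get_geopolitical_zone_alt, PySem.Dict.getD_eq_get?_getD]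
  rw [show pvStateToZone = PySem.Dict.mk pvStateToZone.items from rfl]
  rw [pv_get?_mk_eq_find]
  cases pvStateToZone.items.find? (fun p => p.1 == state) with
  | none => rfl
  | some q => rfl

-- ===== VERDICT (by name: the statement is the Claim_ definition above) =====
theorem get_geopolitical_zone_spec : Claim_equal_get_geopolitical_zone := by
  intro state _
  exact pv_agree state
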